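-- pv_equiv track=rewrite | github.com/mradfo21/5th_Corner_Dev | items.py | add_items_to_inventory
-- ===== SOURCE A (Python) =====
-- MAX_INVENTORY_SIZE = 5
--
-- def add_items_to_inventory(current_inventory: list, new_items: list) -> tuple[list, list]:
--     """
--     Add items to inventory, respecting max size.
--
--     Args:
--         current_inventory: Current inventory list
--         new_items: List of item IDs to add
--
--     Returns:
--         (updated_inventory, items_that_didnt_fit)
--     """
--     updated = current_inventory.copy()
--     didnt_fit = []
--
--     for item in new_items:
--         if len(updated) < MAX_INVENTORY_SIZE:
--             updated.append(item)
--         else: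
--             didnt_fit.append(item)
--
--     return updated, didnt_fit
-- ===== SOURCE B (Python) =====
-- MAX_INVENTORY_SIZE = 5
--
-- def add_items_to_inventory(current_inventory: list, new_items: list) -> tuple[list, list]:
--     space = max(0, MAX_INVENTORY_SIZE - len(current_inventory))
--     return current_inventory.copy() + new_items[:space], new_items[space:]
-- ===== Notes on version B (the rewrite author's own statement) =====
-- stated objective: simpler
-- what changed: Replaced the per-item loop with a length check by one clamped split index: space = max(0, 5 - len(current)), then slice new_items into the part appended and the part returned as overflow.
import Mathlib
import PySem

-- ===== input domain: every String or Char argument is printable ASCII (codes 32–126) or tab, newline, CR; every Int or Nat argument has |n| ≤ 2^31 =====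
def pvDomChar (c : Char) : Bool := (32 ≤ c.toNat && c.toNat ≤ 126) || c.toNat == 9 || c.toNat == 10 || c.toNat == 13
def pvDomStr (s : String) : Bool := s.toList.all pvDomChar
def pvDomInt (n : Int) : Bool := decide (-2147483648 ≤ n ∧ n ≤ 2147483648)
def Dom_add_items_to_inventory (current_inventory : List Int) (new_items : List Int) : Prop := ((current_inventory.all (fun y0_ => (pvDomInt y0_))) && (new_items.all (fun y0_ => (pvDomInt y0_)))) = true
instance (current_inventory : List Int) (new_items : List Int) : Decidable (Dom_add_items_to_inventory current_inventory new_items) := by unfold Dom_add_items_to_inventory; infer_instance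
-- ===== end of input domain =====

-- ===== PORT A =====
-- A: loop over new_items, appending to `updated` while below MAX_INVENTORY_SIZE, else to `didnt_fit`.
def add_items_to_inventory (current_inventory : List Int) (new_items : List Int) : List Int × List Int :=
  let r := new_items.foldl
    (fun (s : List Int × List Int) item =>
      if s.1.length < 5 then (s.1 ++ [item], s.2) else (s.1, s.2 ++ [item]))
    (current_inventory, [])
  r

-- ===== PORT B =====
-- B: one clamped split index, then two slices. (same value; objective: simpler)
def add_items_to_inventory_alt (current_inventory : List Int) (new_items : List Int) : List Int × List Int :=
  let space : Int := max 0 (5 - (current_inventory.length : Int))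
  (current_inventory ++ PySem.List.slice new_items none (some space),
   PySem.List.slice new_items (some space) none)

-- ===== PRECONDITION & SPEC =====
def Spec_add_items_to_inventory (current_inventory : List Int) (new_items : List Int) (out : List Int × List Int) : Prop := out = add_items_to_inventory_alt current_inventory new_items
instance (current_inventory : List Int) (new_items : List Int) (out : List Int × List Int) : Decidable (Spec_add_items_to_inventory current_inventory new_items out) := by unfold Spec_add_items_to_inventory; infer_instance

-- ===== CLAIM (what is proved, stated in full; the proofs are below) =====
def Claim_equal_add_items_to_inventory : Prop := ∀ (current_inventory : List Int) (new_items : List Int), Dom_add_items_to_inventory current_inventory new_items → Spec_add_items_to_inventory current_inventory new_items (add_items_to_inventory current_inventory new_items)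

-- ===== LEMMAS AND PROOFS =====

-- Loop invariant: from any state (u, d), A's fold appends the first (5 - |u|) new items to u
-- and the rest to d (Nat subtraction gives the clamp).
theorem pv_foldl_split (n : List Int) : ∀ (u d : List Int),
    n.foldl (fun (s : List Int × List Int) item =>
      if s.1.length < 5 then (s.1 ++ [item], s.2) else (s.1, s.2 ++ [item])) (u, d)
    = (u ++ n.take (5 - u.length), d ++ n.drop (5 - u.length)) := by
  induction n with
  | nil => intro u d; simp
  | cons a n ih =>
    intro u d
    by_cases h : u.length < 5
    · have h1 : 5 - u.length = (5 - (u ++ [a]).length) + 1 := by simp; omega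
      simp only [List.foldl_cons, if_pos h, ih (u ++ [a]) d, h1, List.take_succ_cons,
        List.drop_succ_cons]
      simp
    · have h0 : 5 - u.length = 0 := by omega
      simp only [List.foldl_cons, if_neg h, ih u (d ++ [a]), h0]
      simp

theorem pv_toNat_clamp (m : Nat) : (max 0 (5 - (m : Int))) = ((5 - m : Nat) : Int) := by omega

-- ===== VERDICT (by name: the statement is the Claim_ definition above) =====
theorem add_items_to_inventory_spec : Claim_equal_add_items_to_inventory := by
  intro c n _
  show _ = _
  simp only [add_items_to_inventory, add_items_to_inventory_alt, pv_foldl_split,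
    pv_toNat_clamp, PySem.List.slice_to_natCast, PySem.List.slice_from_natCast]
  simp
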